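-- pv_equiv track=rewrite | github.com/lord-rudra-1/CS307-Lab-Report-2025 | Lab3/Challenge Problem/k_sat_unsat.py | count_unsatisfied_clauses
-- ===== SOURCE A (Python) =====
-- def count_unsatisfied_clauses(clauses, solution):
--     """Counts how many clauses are unsatisfied under the current solution."""
--     unsatisfied_count = 0
--     for clause in clauses:
--         satisfied = any(
--             (literal > 0 and solution[literal - 1]) or
--             (literal < 0 and not solution[-literal - 1])
--             for literal in clause
--         )
--         if not satisfied:
--             unsatisfied_count += 1
--     return unsatisfied_count
-- ===== SOURCE B (Python) =====
-- def count_unsatisfied_clauses(clauses, solution):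
--     """Counts how many clauses are unsatisfied under the current solution."""
--     # Build occurrence lists: literal -> indices of clauses containing it.
--     occ = {}
--     for idx, clause in enumerate(clauses):
--         for lit in clause:
--             occ.setdefault(lit, []).append(idx)
--     # Mark every clause containing a literal made true by the assignment.
--     satisfied = set()
--     for i, value in enumerate(solution):
--         lit = i + 1 if value else -(i + 1)
--         satisfied.update(occ.get(lit, []))
--     return len(clauses) - len(satisfied)
-- ===== Notes on version B (the rewrite author's own statement) =====
-- stated objective: alternative
-- what changed: B inverts the traversal with the classic SAT occurrence-list structure: it indexes clauses by literal once, then iterates over the assignment's variables marking the clauses each true literal satisfies, and returns total minus marked - no clause is ever scanned for satisfaction.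
import Mathlib
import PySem

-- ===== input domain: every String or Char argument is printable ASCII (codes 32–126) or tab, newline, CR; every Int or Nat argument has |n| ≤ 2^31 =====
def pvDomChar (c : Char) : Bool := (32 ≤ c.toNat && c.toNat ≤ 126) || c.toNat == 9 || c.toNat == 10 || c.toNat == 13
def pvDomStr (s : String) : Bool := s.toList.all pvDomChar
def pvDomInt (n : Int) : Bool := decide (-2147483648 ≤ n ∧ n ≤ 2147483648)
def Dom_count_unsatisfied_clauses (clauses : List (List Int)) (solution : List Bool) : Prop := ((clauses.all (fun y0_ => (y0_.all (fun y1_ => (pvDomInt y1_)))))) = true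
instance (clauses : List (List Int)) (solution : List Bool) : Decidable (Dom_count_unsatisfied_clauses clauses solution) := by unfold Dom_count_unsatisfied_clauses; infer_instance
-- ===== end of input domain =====

-- B inverts the traversal (occurrence lists: literal -> clause indices, then mark clauses satisfied
-- by each true literal and subtract); same asymptotic cost, different algorithm/data structure.

-- ===== PORT A =====
def count_unsatisfied_clauses (clauses : List (List Int)) (solution : List Bool) : Int :=
  clauses.foldl
    (fun unsatisfied_count clause =>
      let satisfied := clause.any (fun literal =>
        (decide (literal > 0) && PySem.List.pyGetD solution (literal - 1) false) ||
        (decide (literal < 0) && !(PySem.List.pyGetD solution (-literal - 1) false)))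
      if !satisfied then unsatisfied_count + 1 else unsatisfied_count)
    0

-- ===== PORT B =====
def count_unsatisfied_clauses_alt (clauses : List (List Int)) (solution : List Bool) : Int :=
  -- occ: literal -> list of indices of clauses containing it (setdefault+append = modify with ++[idx])
  let occ : PySem.Dict Int (List Int) :=
    (PySem.List.enumerate clauses 0).foldl
      (fun d p => p.2.foldl (fun d lit => d.modify lit [] (· ++ [p.1])) d)
      PySem.Dict.empty
  -- satisfied: set of indices of clauses containing a literal made true by the assignment
  let satisfied : PySem.Set Int :=
    (PySem.List.enumerate solution 0).foldl
      (fun s p => PySem.Set.update s (occ.getD (if p.2 then p.1 + 1 else -(p.1 + 1)) []))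
      PySem.Set.empty
  (clauses.length : Int) - PySem.Set.len satisfied

-- ===== PRECONDITION & SPEC =====
-- 'literal l is true under solution' (in range and satisfied), used to state Pre_
def litTrue (solution : List Bool) (l : Int) : Bool :=
  (decide (0 < l) && decide (l.natAbs ≤ solution.length) && PySem.List.pyGetD solution (l - 1) false) ||
  (decide (l < 0) && decide (l.natAbs ≤ solution.length) && !(PySem.List.pyGetD solution (-l - 1) false))

-- Pre_ excludes exactly the inputs where Python A raises IndexError: a clause position holding a
-- literal with |literal| > len(solution) that is not preceded (in its clause) by a true literal.
def Pre_count_unsatisfied_clauses (clauses : List (List Int)) (solution : List Bool) : Prop :=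
  ∀ clause ∈ clauses, ∀ j : Nat, j < clause.length →
    solution.length < (clause[j]!).natAbs →
    ∃ lit ∈ clause.take j, litTrue solution lit = true
instance (clauses : List (List Int)) (solution : List Bool) : Decidable (Pre_count_unsatisfied_clauses clauses solution) := by unfold Pre_count_unsatisfied_clauses; infer_instance

def pvWitness_count_unsatisfied_clauses : List (List Int) × List Bool := ([[1, 7], [-2], []], [true, false])

def Spec_count_unsatisfied_clauses (clauses : List (List Int)) (solution : List Bool) (out : Int) : Prop := out = count_unsatisfied_clauses_alt clauses solution
instance (clauses : List (List Int)) (solution : List Bool) (out : Int) : Decidable (Spec_count_unsatisfied_clauses clauses solution out) := by unfold Spec_count_unsatisfied_clauses; infer_instance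

-- ===== CLAIM =====
def Claim_equal_count_unsatisfied_clauses : Prop := ∀ (clauses : List (List Int)) (solution : List Bool), Dom_count_unsatisfied_clauses clauses solution → Pre_count_unsatisfied_clauses clauses solution → Spec_count_unsatisfied_clauses clauses solution (count_unsatisfied_clauses clauses solution)

-- ===== LEMMAS AND PROOFS =====

-- a literal equals some assignment-made-true literal iff litTrue
lemma litTrue_iff_exists (solution : List Bool) (lit : Int) :
    litTrue solution lit = true ↔
    ∃ i : Nat, ∃ _ : i < solution.length,
      lit = (if solution[i] then (i : Int) + 1 else -((i : Int) + 1)) := by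
  simp only [litTrue, Bool.or_eq_true, Bool.and_eq_true, decide_eq_true_eq, Bool.not_eq_true']
  constructor
  · rintro (⟨⟨hpos, hle⟩, hget⟩ | ⟨⟨hneg, hle⟩, hget⟩)
    · have hi : (lit - 1).toNat < solution.length := by omega
      rw [show lit - 1 = (((lit - 1).toNat : Nat) : Int) by omega,
          PySem.List.pyGetD_ofNat solution _ false hi] at hget
      exact ⟨(lit - 1).toNat, hi, by rw [hget]; simp; omega⟩
    · have hi : (-lit - 1).toNat < solution.length := by omega
      rw [show -lit - 1 = (((-lit - 1).toNat : Nat) : Int) by omega,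
          PySem.List.pyGetD_ofNat solution _ false hi] at hget
      exact ⟨(-lit - 1).toNat, hi, by rw [hget]; simp; omega⟩
  · rintro ⟨i, hi, hx⟩
    cases hb : solution[i] with
    | true =>
      rw [hb] at hx; simp only [if_true] at hx
      refine Or.inl ⟨⟨by omega, by omega⟩, ?_⟩
      rw [show lit - 1 = ((i : Nat) : Int) by omega,
          PySem.List.pyGetD_ofNat solution i false hi]
      exact hb
    | false =>
      rw [hb] at hx; simp only [Bool.false_eq_true, if_false] at hx
      refine Or.inr ⟨⟨by omega, by omega⟩, ?_⟩
      rw [show -lit - 1 = ((i : Nat) : Int) by omega,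
          PySem.List.pyGetD_ofNat solution i false hi]
      exact hb

-- a true literal makes A's per-literal test fire
lemma atest_of_litTrue (solution : List Bool) (l : Int) (h : litTrue solution l = true) :
    ((decide (l > 0) && PySem.List.pyGetD solution (l - 1) false) ||
     (decide (l < 0) && !(PySem.List.pyGetD solution (-l - 1) false))) = true := by
  simp only [litTrue, Bool.or_eq_true, Bool.and_eq_true, decide_eq_true_eq] at h ⊢
  rcases h with ⟨⟨h1, _⟩, h2⟩ | ⟨⟨h1, _⟩, h2⟩
  · exact Or.inl ⟨h1, h2⟩
  · exact Or.inr ⟨h1, by simp [h2]⟩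

-- an in-range literal that is not true does not fire A's test
lemma atest_false (solution : List Bool) (l : Int) (hle : l.natAbs ≤ solution.length)
    (h : litTrue solution l = false) :
    ((decide (l > 0) && PySem.List.pyGetD solution (l - 1) false) ||
     (decide (l < 0) && !(PySem.List.pyGetD solution (-l - 1) false))) = false := by
  simp only [litTrue, Bool.or_eq_false_iff, Bool.and_eq_false_iff] at h ⊢
  rcases h with ⟨h1, h2⟩
  constructor
  · rcases h1 with h | h
    · rcases h with h | h
      · exact Or.inl h
      · exact absurd hle (by simpa using h)
    · exact Or.inr h
  · rcases h2 with h | h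
    · rcases h with h | h
      · exact Or.inl h
      · exact absurd hle (by simpa using h)
    · exact Or.inr h

-- under Pre_'s per-clause condition, A's clause test equals 'some literal is litTrue'
lemma any_eq_any (solution : List Bool) (clause : List Int)
    (hok : ∀ j : Nat, j < clause.length → solution.length < (clause[j]!).natAbs →
      ∃ lit ∈ clause.take j, litTrue solution lit = true) :
    clause.any (fun literal =>
      (decide (literal > 0) && PySem.List.pyGetD solution (literal - 1) false) ||
      (decide (literal < 0) && !(PySem.List.pyGetD solution (-literal - 1) false))) =
    clause.any (litTrue solution) := by
  by_cases hex : ∃ l ∈ clause, litTrue solution l = true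
  · obtain ⟨l, hl, hT⟩ := hex
    rw [List.any_eq_true.mpr ⟨l, hl, atest_of_litTrue solution l hT⟩,
        List.any_eq_true.mpr ⟨l, hl, hT⟩]
  · push Not at hex
    rw [List.any_eq_false.mpr, List.any_eq_false.mpr]
    · intro l hl
      exact Bool.not_eq_true _ ▸ (Bool.eq_false_iff.mpr (hex l hl))
    · intro l hl
      by_cases hle : l.natAbs ≤ solution.length
      · simp [atest_false solution l hle (Bool.eq_false_iff.mpr (hex l hl))]
      · obtain ⟨j, hj, rfl⟩ := List.mem_iff_getElem.mp hl
        obtain ⟨lit, hmem, hT⟩ := hok j hj (by rw [getElem!_pos clause j hj]; omega)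
        exact absurd hT (hex lit (List.mem_of_mem_take hmem))

-- membership in B's occurrence dict: idx appears under lit iff clause idx contains lit
lemma mem_occ (clauses : List (List Int)) (lit idx : Int) :
    idx ∈ ((PySem.List.enumerate clauses 0).foldl
        (fun d p => p.2.foldl (fun d l => d.modify l [] (· ++ [p.1])) d)
        PySem.Dict.empty).getD lit [] ↔
    ∃ j : Nat, ∃ _ : j < clauses.length, idx = (j : Int) ∧ lit ∈ clauses[j] := by
  have hflat : (PySem.List.enumerate clauses 0).foldl
      (fun d p => p.2.foldl (fun d l => d.modify l [] (· ++ [p.1])) d)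
      PySem.Dict.empty
    = ((PySem.List.enumerate clauses 0).flatMap (fun p => p.2.map (fun l => (l, p.1)))).foldl
        (fun d q => d.modify q.1 [] (· ++ [q.2])) PySem.Dict.empty := by
    rw [List.foldl_flatMap]
    simp only [List.foldl_map]
  rw [hflat, PySem.Dict.getD_foldl_modify_append]
  set pairs := (PySem.List.enumerate clauses 0).flatMap (fun p => p.2.map (fun l => (l, p.1)))
    with hpairs
  have h1 : idx ∈ PySem.Dict.empty.getD lit [] ++
      (pairs.filter (fun p => p.1 == lit)).map (·.2) ↔ (lit, idx) ∈ pairs := by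
    simp only [PySem.Dict.getD_empty, List.nil_append, List.mem_map, List.mem_filter, beq_iff_eq]
    constructor
    · rintro ⟨⟨a, b⟩, ⟨hq, hfst⟩, hsnd⟩
      simp only at hfst hsnd
      subst hfst; subst hsnd; exact hq
    · intro hq; exact ⟨(lit, idx), ⟨hq, rfl⟩, rfl⟩
  rw [h1, hpairs]
  simp only [List.mem_flatMap, PySem.List.mem_enumerate_iff, List.mem_map, Prod.mk.injEq]
  constructor
  · rintro ⟨p, ⟨j, hj, rfl⟩, l, hl, hlit, hidx⟩
    simp only [zero_add] at hl hlit hidx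
    exact ⟨j, hj, hidx.symm, hlit ▸ hl⟩
  · rintro ⟨j, hj, rfl, hmem⟩
    exact ⟨((j : Int), clauses[j]), ⟨j, hj, by simp⟩, lit, by simpa using hmem, rfl, rfl⟩

-- membership in the satisfied-set fold
lemma mem_sat_fold (xs : List Bool) (occ : PySem.Dict Int (List Int))
    (s0 : PySem.Set Int) (st x : Int) :
    x ∈ (PySem.List.enumerate xs st).foldl
        (fun s p => PySem.Set.update s (occ.getD (if p.2 then p.1 + 1 else -(p.1 + 1)) [])) s0 ↔
    x ∈ s0 ∨ ∃ i : Nat, ∃ _ : i < xs.length,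
      x ∈ occ.getD (if xs[i] then st + i + 1 else -(st + i + 1)) [] := by
  induction xs generalizing s0 st with
  | nil => simp [PySem.List.enumerate]
  | cons b bs ih =>
    rw [PySem.List.enumerate_cons]
    simp only [List.foldl_cons, ih, PySem.Set.mem_update, List.length_cons]
    constructor
    · rintro (⟨h | h⟩ | ⟨i, hi, hx⟩)
      · exact Or.inl h
      · exact Or.inr ⟨0, by omega, by simpa using h⟩
      · refine Or.inr ⟨i + 1, by omega, ?_⟩
        simpa [show st + 1 + (i : Int) + 1 = st + ((i : Int) + 1) + 1 by ring] using hx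
    · rintro (h | ⟨i, hi, hx⟩)
      · exact Or.inl (Or.inl h)
      · cases i with
        | zero => exact Or.inl (Or.inr (by simpa using hx))
        | succ j =>
          refine Or.inr ⟨j, by omega, ?_⟩
          simpa [show st + 1 + (j : Int) + 1 = st + ((j : Int) + 1) + 1 by ring] using hx

-- the satisfied-set fold keeps the set Nodup
lemma nodup_sat_fold (xs : List Bool) (occ : PySem.Dict Int (List Int))
    (s0 : PySem.Set Int) (st : Int) (h : s0.Nodup) :
    ((PySem.List.enumerate xs st).foldl
        (fun s p => PySem.Set.update s (occ.getD (if p.2 then p.1 + 1 else -(p.1 + 1)) [])) s0).Nodup := by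
  induction xs generalizing s0 st with
  | nil => simpa [PySem.List.enumerate]
  | cons b bs ih =>
    rw [PySem.List.enumerate_cons]
    exact ih _ _ (PySem.Set.nodup_update _ _ h)

-- a Nodup list whose members are exactly the casted indices satisfying q has length (range n).countP q
lemma length_eq_countP_range (l : List Int) (hnd : l.Nodup) (n : Nat) (q : Nat → Bool)
    (h : ∀ x, x ∈ l ↔ ∃ j : Nat, j < n ∧ x = (j : Int) ∧ q j = true) :
    l.length = (List.range n).countP q := by
  have hperm : l.Perm (((List.range n).filter q).map (fun j : Nat => (j : Int))) := by
    rw [List.perm_ext_iff_of_nodup hnd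
      (((List.nodup_range).filter q).map (fun a b hab => by exact_mod_cast hab))]
    intro a
    rw [h]
    simp only [List.mem_map, List.mem_filter, List.mem_range]
    constructor
    · rintro ⟨j, h1, h2, h3⟩; exact ⟨j, ⟨h1, h3⟩, h2.symm⟩
    · rintro ⟨j, ⟨h1, h3⟩, h2⟩; exact ⟨j, h1, h2.symm, h3⟩
  rw [hperm.length_eq, List.length_map, ← List.countP_eq_length_filter]

-- counting over indices equals counting over the list
lemma countP_range_getD {α : Type} (l : List α) (d : α) (p : α → Bool) :
    (List.range l.length).countP (fun j => p (l.getD j d)) = l.countP p := by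
  induction l using List.reverseRecOn with
  | nil => simp
  | append_singleton xs a ih =>
    rw [List.length_append, List.length_singleton, List.range_succ,
        List.countP_append, List.countP_append]
    congr 1
    · rw [← ih]
      apply List.countP_congr
      intro j hj
      rw [List.getD_append _ _ _ _ (List.mem_range.mp hj)]
    · simp [List.countP_singleton]

-- ===== VERDICT =====
theorem count_unsatisfied_clauses_spec : Claim_equal_count_unsatisfied_clauses := by
  intro clauses solution _ hpre
  unfold Spec_count_unsatisfied_clauses count_unsatisfied_clauses count_unsatisfied_clauses_alt
  simp only []
  rw [PySem.List.foldl_count_if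
      (fun clause => !(clause.any (fun literal =>
        (decide (literal > 0) && PySem.List.pyGetD solution (literal - 1) false) ||
        (decide (literal < 0) && !(PySem.List.pyGetD solution (-literal - 1) false))))) clauses 0,
      zero_add]
  have hA : clauses.countP (fun clause => !(clause.any (fun literal =>
        (decide (literal > 0) && PySem.List.pyGetD solution (literal - 1) false) ||
        (decide (literal < 0) && !(PySem.List.pyGetD solution (-literal - 1) false)))))
      = clauses.countP (fun clause => !(clause.any (litTrue solution))) := by
    apply List.countP_congr
    intro clause hc
    rw [any_eq_any solution clause (hpre clause hc)]
  rw [hA]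
  -- B's satisfied set has exactly the indices of clauses containing a true literal
  have hsatlen : (PySem.Set.len ((PySem.List.enumerate solution 0).foldl
      (fun s p => PySem.Set.update s
        (((PySem.List.enumerate clauses 0).foldl
            (fun d p => p.2.foldl (fun d lit => d.modify lit [] (· ++ [p.1])) d)
            PySem.Dict.empty).getD (if p.2 then p.1 + 1 else -(p.1 + 1)) [])) PySem.Set.empty))
      = ((List.range clauses.length).countP
          (fun j => (clauses.getD j []).any (litTrue solution)) : Int) := by
    unfold PySem.Set.len
    congr 1
    apply length_eq_countP_range _ (nodup_sat_fold _ _ _ _ (by simp [PySem.Set.empty]))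
    intro x
    rw [mem_sat_fold]
    simp only [PySem.Set.empty, List.not_mem_nil, false_or, zero_add]
    constructor
    · rintro ⟨i, hi, hx⟩
      rw [mem_occ] at hx
      obtain ⟨j, hj, rfl, hmem⟩ := hx
      refine ⟨j, hj, rfl, ?_⟩
      rw [List.getD_eq_getElem _ _ hj]
      exact List.any_eq_true.mpr ⟨_, hmem, (litTrue_iff_exists solution _).mpr ⟨i, hi, rfl⟩⟩
    · rintro ⟨j, hj, rfl, hq⟩
      rw [List.getD_eq_getElem _ _ hj] at hq
      obtain ⟨lit, hmem, hT⟩ := List.any_eq_true.mp hq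
      obtain ⟨i, hi, rfl⟩ := (litTrue_iff_exists solution lit).mp hT
      exact ⟨i, hi, (mem_occ clauses _ _).mpr ⟨j, hj, rfl, hmem⟩⟩
  rw [hsatlen, countP_range_getD clauses [] (fun clause => clause.any (litTrue solution))]
  have hsum := List.length_eq_countP_add_countP (fun clause => clause.any (litTrue solution))
    (l := clauses)
  have hnot : clauses.countP (fun a => decide ¬((fun clause => clause.any (litTrue solution)) a = true))
      = clauses.countP (fun clause => !(clause.any (litTrue solution))) := by
    apply List.countP_congr
    intro c _
    simp
  rw [hnot] at hsum
  omega
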